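-- pv_equiv track=rewrite | github.com/hamishdean/AI_text_to_speech_reader | openai_text_to_speech_reader.py | split_text_into_batches
-- ===== SOURCE A (Python) =====
-- BATCH_CHAR_LIMIT = 4000
--
-- def split_text_into_batches(text, limit=BATCH_CHAR_LIMIT):
--     """Split text into batches that respect sentence boundaries where possible."""
--     batches = []
--     while text:
--         if len(text) <= limit:
--             batches.append(text)
--             break
--         # Try to split at the last sentence-ending punctuation within the limit
--         chunk = text[:limit]
--         split_pos = -1
--         for sep in ['. ', '.\n', '! ', '!\n', '? ', '?\n']:
--             pos = chunk.rfind(sep)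
--             if pos > split_pos:
--                 split_pos = pos + 1  # include the punctuation
--         if split_pos <= 0:
--             # Fall back to last space
--             split_pos = chunk.rfind(' ')
--         if split_pos <= 0:
--             # No good break point, hard split
--             split_pos = limit
--         part = text[:split_pos].strip()
--         if part:
--             batches.append(part)
--         text = text[split_pos:].strip()
--     return batches
-- ===== SOURCE B (Python) =====
-- BATCH_CHAR_LIMIT = 4000
--
-- def _break_pos(text, start, limit):
--     """Relative break position inside text[start:start+limit]: one backward scan
--     for the last sentence break, else a backward scan for the last usable space,
--     else a hard cut at limit."""
--     i = start + limit - 2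
--     while i >= start:
--         if text[i] in '.!?' and text[i + 1] in ' \n':
--             return i + 1 - start
--         i -= 1
--     j = start + limit - 1
--     while j > start:
--         if text[j] == ' ':
--             return j - start
--         j -= 1
--     return limit
--
-- def split_text_into_batches(text, limit=BATCH_CHAR_LIMIT):
--     """Index-based single pass over the original string: no repeated re-slicing
--     and re-stripping of the tail."""
--     if not text:
--         return []
--     if len(text) <= limit:
--         return [text]
--     batches = []
--     n = len(text)
--     while n > 0 and text[n - 1].isspace():   # right end stripped once, up front
--         n -= 1
--     start = 0
--     while True:
--         split = _break_pos(text, start, limit)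
--         part = text[start:start + split].strip()
--         if part:
--             batches.append(part)
--         start += split
--         while start < n and text[start].isspace():
--             start += 1
--         if start >= n:
--             return batches
--         if n - start <= limit:
--             batches.append(text[start:n])
--             return batches
-- ===== Notes on version B (the rewrite author's own statement) =====
-- stated objective: alternative
-- what changed: B walks the original string with index arithmetic (an rstrip end computed once, a start cursor advanced past whitespace) instead of A's re-slicing and re-stripping the tail each batch, and finds each break point with one explicit backward scan instead of A's six rfind passes plus a max-fold over separators.
-- outside the precondition, e.g. on split_text_into_batches('a ', -1): A returns ['a'], B does not finish within the time limit; on split_text_into_batches('  ', 0): A returns [], B returns []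
import Mathlib
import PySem

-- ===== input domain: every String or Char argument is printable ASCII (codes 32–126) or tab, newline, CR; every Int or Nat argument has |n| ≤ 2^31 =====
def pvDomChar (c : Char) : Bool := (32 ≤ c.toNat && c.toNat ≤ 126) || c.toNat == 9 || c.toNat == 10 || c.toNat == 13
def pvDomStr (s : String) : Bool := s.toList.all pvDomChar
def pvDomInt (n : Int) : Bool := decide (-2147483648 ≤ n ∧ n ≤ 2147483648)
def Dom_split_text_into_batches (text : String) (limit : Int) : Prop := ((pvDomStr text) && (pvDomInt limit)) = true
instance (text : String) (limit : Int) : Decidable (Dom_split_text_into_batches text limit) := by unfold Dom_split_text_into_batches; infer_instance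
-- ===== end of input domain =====

-- B replaces A's repeated slice-and-restrip of the tail (and its six rfind passes per batch)
-- by index arithmetic over the original string with one backward scan per batch; objective:
-- alternative (a different traversal of the same data; a timing run does not favour it).

-- ===== PORT A =====
-- the six sentence-ending separators, in A's order
def pvSeps : List (List Char) := [['.', ' '], ['.', '\n'], ['!', ' '], ['!', '\n'], ['?', ' '], ['?', '\n']]

-- the while-loop of A as fuel recursion (fuel = |text|+1 suffices on every input Pre_ admits;
-- on limit ≤ 0 with nonempty text the Python loops forever, which Pre_ excludes)
def pvLoopA (lim : Int) : Nat → List Char → List String → List String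
  | 0, _, batches => batches
  | fuel+1, t, batches =>
    if t = [] then batches
    else if (t.length : Int) ≤ lim then batches ++ [String.ofList t]
    else
      let chunk := PySem.List.slice t none (some lim)
      let sp0 := pvSeps.foldl (fun sp sep =>
        let pos := PySem.Chars.rfind chunk sep
        if pos > sp then pos + 1 else sp) (-1)
      let sp1 := if sp0 ≤ 0 then PySem.Chars.rfind chunk [' '] else sp0
      let sp2 := if sp1 ≤ 0 then lim else sp1
      let part := PySem.Chars.strip (PySem.List.slice t none (some sp2))
      let batches' := if part = [] then batches else batches ++ [String.ofList part]
      pvLoopA lim fuel (PySem.Chars.strip (PySem.List.slice t (some sp2) none)) batches'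

def split_text_into_batches (text : String) (limit : Int) : List String :=
  pvLoopA limit (text.toList.length + 1) text.toList []

-- ===== PORT B =====
-- `text[i] in '.!?' and text[i+1] in ' \n'` (indices in range at every use site)
def pvIsBreakAt (t : List Char) (i : Nat) : Bool :=
  (t.getD i 'A' == '.' || t.getD i 'A' == '!' || t.getD i 'A' == '?') &&
  (t.getD (i+1) 'A' == ' ' || t.getD (i+1) 'A' == '\n')

-- descending while-loop: tests positions lo+k-1, lo+k-2, …, lo, first hit wins
def pvScanBack (p : Nat → Bool) (lo : Nat) : Nat → Option Nat
  | 0 => none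
  | k+1 => if p (lo + k) then some (lo + k) else pvScanBack p lo k

-- _break_pos of Source B
def pvBreakPos (t : List Char) (start lim : Nat) : Nat :=
  match pvScanBack (fun i => pvIsBreakAt t i) start (lim - 1) with
  | some i => i + 1 - start
  | none =>
    match pvScanBack (fun j => t.getD j 'A' == ' ') (start + 1) (lim - 1) with
    | some j => j - start
    | none => lim

-- `while n > 0 and text[n-1].isspace(): n -= 1`
def pvRstripEnd (t : List Char) : Nat → Nat
  | 0 => 0
  | n+1 => if PySem.Chars.isspace (t.getD n 'A') then pvRstripEnd t n else n+1

-- `while start < n and text[start].isspace(): start += 1`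
def pvSkipWs (t : List Char) (n start : Nat) : Nat :=
  if h : start < n ∧ PySem.Chars.isspace (t.getD start 'A') then pvSkipWs t n (start+1) else start
  termination_by n - start
  decreasing_by omega

-- the main while-loop of Source B as fuel recursion (fuel = |text|+1 suffices under Pre_)
def pvLoopB (t : List Char) (lim n : Nat) : Nat → Nat → List String → List String
  | 0, _, batches => batches
  | fuel+1, start, batches =>
    let split := pvBreakPos t start lim
    let part := PySem.Chars.strip (PySem.List.slice t (some (start : Int)) (some ((start : Int) + (split : Int))))
    let batches' := if part = [] then batches else batches ++ [String.ofList part]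
    let start' := pvSkipWs t n (start + split)
    if n ≤ start' then batches'
    else if n - start' ≤ lim then batches' ++ [String.ofList (PySem.List.slice t (some (start' : Int)) (some (n : Int)))]
    else pvLoopB t lim n fuel start' batches'

-- limit.toNat is exact for every limit Pre_ admits (1 ≤ limit; with text = "" the loop is not reached)
def split_text_into_batches_alt (text : String) (limit : Int) : List String :=
  let t := text.toList
  if t = [] then []
  else if (t.length : Int) ≤ limit then [text]
  else pvLoopB t limit.toNat (pvRstripEnd t t.length) (t.length + 1) 0 []

-- ===== PRECONDITION & SPEC =====
-- Pre_ excludes nonpositive limits with nonempty text: Python A then loops forever on all but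
-- degenerate (essentially whitespace-only) texts, and B diverges on those degenerate remainders too.
def Pre_split_text_into_batches (text : String) (limit : Int) : Prop := 1 ≤ limit ∨ text = ""
instance (text : String) (limit : Int) : Decidable (Pre_split_text_into_batches text limit) := by
  unfold Pre_split_text_into_batches; infer_instance

def pvWitness_split_text_into_batches : String × Int := ("One. Two! Three? Four five six", 12)

def Spec_split_text_into_batches (text : String) (limit : Int) (out : List String) : Prop := out = split_text_into_batches_alt text limit
instance (text : String) (limit : Int) (out : List String) : Decidable (Spec_split_text_into_batches text limit out) := by unfold Spec_split_text_into_batches; infer_instance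

-- ===== CLAIM (what is proved, stated in full; the proofs are below) =====
def Claim_equal_split_text_into_batches : Prop := ∀ (text : String) (limit : Int), Dom_split_text_into_batches text limit → Pre_split_text_into_batches text limit → Spec_split_text_into_batches text limit (split_text_into_batches text limit)

-- ===== LEMMAS AND PROOFS =====

lemma pvPrefix2 (s : List Char) (j : Nat) (a b : Char) :
    ([a, b].isPrefixOf (s.drop j) = true) ↔ (s[j]? = some a ∧ s[j+1]? = some b) := by
  have h0 : s[j]? = (s.drop j)[0]? := by simp [List.getElem?_drop]
  have h1 : s[j+1]? = (s.drop j)[1]? := by rw [List.getElem?_drop]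
  rw [h0, h1]
  rcases hd : s.drop j with _ | ⟨c, _ | ⟨d, r⟩⟩ <;> (simp [List.isPrefixOf]; try aesop)

lemma pvPrefix1 (s : List Char) (j : Nat) (a : Char) :
    ([a].isPrefixOf (s.drop j) = true) ↔ (s[j]? = some a) := by
  have h0 : s[j]? = (s.drop j)[0]? := by simp [List.getElem?_drop]
  rw [h0]
  rcases hd : s.drop j with _ | ⟨c, r⟩ <;> (simp [List.isPrefixOf]; try aesop)

lemma pvGoSpec (s sub : List Char) (x : Nat) :
    (PySem.Chars.rfind.go s sub x = -1 ∧ ∀ j, j ≤ x → sub.isPrefixOf (s.drop j) = false)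
  ∨ (∃ m : Nat, m ≤ x ∧ PySem.Chars.rfind.go s sub x = (m : Int) ∧ sub.isPrefixOf (s.drop m) = true ∧
      ∀ j, m < j → j ≤ x → sub.isPrefixOf (s.drop j) = false) := by
  induction x with
  | zero =>
    by_cases h : sub.isPrefixOf s = true
    · exact Or.inr ⟨0, le_refl _, by simp [PySem.Chars.rfind.go, h], by simpa using h, by omega⟩
    · refine Or.inl ⟨by simp [PySem.Chars.rfind.go, h], ?_⟩
      intro j hj
      interval_cases j
      simp only [Bool.not_eq_true] at h
      simpa using h
  | succ x ih =>
    by_cases h : sub.isPrefixOf (s.drop (x+1)) = true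
    · exact Or.inr ⟨x+1, le_refl _, by simp [PySem.Chars.rfind.go, h], h, by omega⟩
    · have hgo : PySem.Chars.rfind.go s sub (x+1) = PySem.Chars.rfind.go s sub x := by
        simp [PySem.Chars.rfind.go, h]
      rcases ih with ⟨h1, h2⟩ | ⟨m, h1, h2, h3, h4⟩
      · refine Or.inl ⟨by rw [hgo, h1], ?_⟩
        intro j hj
        rcases Nat.lt_or_ge j (x+1) with hlt | hge
        · exact h2 j (by omega)
        · have : j = x+1 := by omega
          subst this
          simp only [Bool.not_eq_true] at h
          exact h
      · refine Or.inr ⟨m, by omega, by rw [hgo, h2], h3, ?_⟩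
        intro j hj1 hj2
        rcases Nat.lt_or_ge j (x+1) with hlt | hge
        · exact h4 j hj1 (by omega)
        · have : j = x+1 := by omega
          subst this
          simp only [Bool.not_eq_true] at h
          exact h

lemma pvNoPrefix_past (s sub : List Char) (hsub : sub ≠ []) (j : Nat) (hj : s.length ≤ j) :
    sub.isPrefixOf (s.drop j) = false := by
  have : s.drop j = [] := List.drop_eq_nil_of_le hj
  rw [this]
  rcases sub with _ | ⟨c, r⟩
  · exact absurd rfl hsub
  · simp [List.isPrefixOf]

lemma pvRfindSpec (s sub : List Char) (hsub : sub ≠ []) :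
    (PySem.Chars.rfind s sub = -1 ∧ ∀ j, sub.isPrefixOf (s.drop j) = false)
  ∨ (∃ m : Nat, PySem.Chars.rfind s sub = (m : Int) ∧ sub.isPrefixOf (s.drop m) = true ∧
      ∀ j, m < j → sub.isPrefixOf (s.drop j) = false) := by
  have := pvGoSpec s sub s.length
  rcases this with ⟨h1, h2⟩ | ⟨m, h1, h2, h3, h4⟩
  · refine Or.inl ⟨h1, ?_⟩
    intro j
    rcases Nat.lt_or_ge j (s.length + 1) with hlt | hge
    · exact h2 j (by omega)
    · exact pvNoPrefix_past s sub hsub j (by omega)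
  · refine Or.inr ⟨m, h2, h3, ?_⟩
    intro j hj
    rcases Nat.lt_or_ge s.length j with hgt | hle
    · exact pvNoPrefix_past s sub hsub j (by omega)
    · exact h4 j hj hle

def pvBrP (t : List Char) (i : Nat) : Prop :=
  (t[i]? = some '.' ∨ t[i]? = some '!' ∨ t[i]? = some '?') ∧
  (t[i+1]? = some ' ' ∨ t[i+1]? = some '\n')

lemma pvBrP_iff_sep (t : List Char) (i : Nat) :
    pvBrP t i ↔ ∃ sep ∈ pvSeps, sep.isPrefixOf (t.drop i) = true := by
  unfold pvBrP pvSeps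
  constructor
  · rintro ⟨h1 | h1 | h1, h2 | h2⟩ <;>
      [exact ⟨['.',' '], by simp, (pvPrefix2 t i '.' ' ').mpr ⟨h1, h2⟩⟩;
       exact ⟨['.','\n'], by simp, (pvPrefix2 t i '.' '\n').mpr ⟨h1, h2⟩⟩;
       exact ⟨['!',' '], by simp, (pvPrefix2 t i '!' ' ').mpr ⟨h1, h2⟩⟩;
       exact ⟨['!','\n'], by simp, (pvPrefix2 t i '!' '\n').mpr ⟨h1, h2⟩⟩;
       exact ⟨['?',' '], by simp, (pvPrefix2 t i '?' ' ').mpr ⟨h1, h2⟩⟩;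
       exact ⟨['?','\n'], by simp, (pvPrefix2 t i '?' '\n').mpr ⟨h1, h2⟩⟩]
  · rintro ⟨sep, hsep, hpre⟩
    fin_cases hsep <;>
      (first
        | (have := (pvPrefix2 t i '.' ' ').mp hpre; tauto)
        | (have := (pvPrefix2 t i '.' '\n').mp hpre; tauto)
        | (have := (pvPrefix2 t i '!' ' ').mp hpre; tauto)
        | (have := (pvPrefix2 t i '!' '\n').mp hpre; tauto)
        | (have := (pvPrefix2 t i '?' ' ').mp hpre; tauto)
        | (have := (pvPrefix2 t i '?' '\n').mp hpre; tauto))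

-- shape of every separator: punctuation then whitespace
lemma pvSeps_shape : ∀ sep ∈ pvSeps, ∃ p w, sep = [p, w] ∧
    (p = '.' ∨ p = '!' ∨ p = '?') ∧ (w = ' ' ∨ w = '\n') := by
  intro sep hsep
  fin_cases hsep <;> simp

-- no two separator occurrences are adjacent: position after a break holds whitespace, not punctuation
lemma pvNoAdjacent (t : List Char) (m : Nat) (hm : pvBrP t m) (sep : List Char)
    (hsep : sep ∈ pvSeps) : sep.isPrefixOf (t.drop (m+1)) = false := by
  obtain ⟨p, w, rfl, hp, hw⟩ := pvSeps_shape sep hsep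
  by_contra hc
  have hc' : ([p, w].isPrefixOf (t.drop (m+1))) = true := by
    cases h : ([p, w].isPrefixOf (t.drop (m+1))) with
    | false => exact absurd h hc
    | true => rfl
  have h1 := (pvPrefix2 t (m+1) p w).mp hc'
  rcases hm with ⟨_, h2 | h2⟩ <;> rcases hp with rfl | rfl | rfl <;>
    rw [h1.1] at h2 <;> simp at h2

-- invariant of A's fold over the separators
lemma pvFoldInv (chunk : List Char) (L : List (List Char)) :
    ∀ (S : List (List Char)) (sp : Int),
    (∀ sep ∈ L, sep ∈ pvSeps) →
    ((sp = -1 ∧ ∀ sep ∈ S, ∀ j, sep.isPrefixOf (chunk.drop j) = false)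
      ∨ (∃ m : Nat, sp = (m : Int) + 1 ∧ pvBrP chunk m ∧
          ∀ sep ∈ S, ∀ j, sep.isPrefixOf (chunk.drop j) = true → j ≤ m)) →
    (let r := L.foldl (fun sp sep =>
        let pos := PySem.Chars.rfind chunk sep
        if pos > sp then pos + 1 else sp) sp
     (r = -1 ∧ ∀ sep ∈ S ++ L, ∀ j, sep.isPrefixOf (chunk.drop j) = false)
      ∨ (∃ m : Nat, r = (m : Int) + 1 ∧ pvBrP chunk m ∧
          ∀ sep ∈ S ++ L, ∀ j, sep.isPrefixOf (chunk.drop j) = true → j ≤ m)) := by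
  induction L with
  | nil => intro S sp _ hacc; simpa using hacc
  | cons sep L ih =>
    intro S sp hL hacc
    have hsepSeps : sep ∈ pvSeps := hL sep (by simp)
    have hsepne : sep ≠ [] := by
      obtain ⟨p, w, rfl, _, _⟩ := pvSeps_shape sep hsepSeps
      simp
    have hres := pvRfindSpec chunk sep hsepne
    have key : ((if PySem.Chars.rfind chunk sep > sp then PySem.Chars.rfind chunk sep + 1 else sp) = -1 ∧
          ∀ s' ∈ S ++ [sep], ∀ j, s'.isPrefixOf (chunk.drop j) = false)
      ∨ (∃ m : Nat, (if PySem.Chars.rfind chunk sep > sp then PySem.Chars.rfind chunk sep + 1 else sp) = (m : Int) + 1 ∧ pvBrP chunk m ∧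
          ∀ s' ∈ S ++ [sep], ∀ j, s'.isPrefixOf (chunk.drop j) = true → j ≤ m) := by
      rcases hacc with ⟨hsp, hnone⟩ | ⟨m, hsp, hbr, hmax⟩
      · rcases hres with ⟨h1, h2⟩ | ⟨k, h1, h2, h3⟩
        · subst hsp
          rw [h1]
          refine Or.inl ⟨by norm_num, ?_⟩
          intro s' hs' j
          rcases List.mem_append.mp hs' with h | h
          · exact hnone s' h j
          · simp at h; subst h; exact h2 j
        · subst hsp
          rw [h1]
          have hgt : (k : Int) > -1 := by omega
          rw [if_pos hgt]
          refine Or.inr ⟨k, rfl, (pvBrP_iff_sep chunk k).mpr ⟨sep, hsepSeps, h2⟩, ?_⟩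
          intro s' hs' j hj
          rcases List.mem_append.mp hs' with h | h
          · exact absurd hj (by simp [hnone s' h j])
          · simp at h; subst h
            by_contra hc
            exact absurd hj (by simp [h3 j (by omega)])
      · rcases hres with ⟨h1, h2⟩ | ⟨k, h1, h2, h3⟩
        · subst hsp
          rw [h1]
          have hng : ¬ ((-1 : Int) > (m : Int) + 1) := by omega
          rw [if_neg hng]
          refine Or.inr ⟨m, rfl, hbr, ?_⟩
          intro s' hs' j hj
          rcases List.mem_append.mp hs' with h | h
          · exact hmax s' h j hj
          · simp at h; subst h; exact absurd hj (by simp [h2 j])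
        · subst hsp
          rw [h1]
          by_cases hgt : (k : Int) > (m : Int) + 1
          · rw [if_pos hgt]
            refine Or.inr ⟨k, rfl, (pvBrP_iff_sep chunk k).mpr ⟨sep, hsepSeps, h2⟩, ?_⟩
            intro s' hs' j hj
            rcases List.mem_append.mp hs' with h | h
            · have := hmax s' h j hj
              omega
            · simp at h; subst h
              by_contra hc
              exact absurd hj (by simp [h3 j (by omega)])
          · rw [if_neg hgt]
            have hk : k ≤ m + 1 := by exact_mod_cast by omega
            refine Or.inr ⟨m, rfl, hbr, ?_⟩
            intro s' hs' j hj
            rcases List.mem_append.mp hs' with h | h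
            · exact hmax s' h j hj
            · simp at h; subst h
              -- a sep match at j: j ≤ k ≤ m+1, and j = m+1 is impossible (no adjacent breaks)
              have hjk : j ≤ k := by
                by_contra hc
                exact absurd hj (by simp [h3 j (by omega)])
              rcases Nat.lt_or_ge j (m+1) with hlt | hge
              · omega
              · have : j = m + 1 := by omega
                subst this
                have hna := pvNoAdjacent chunk m hbr s' hsepSeps
                simp [hj] at hna
    have := ih (S ++ [sep]) _ (fun s hs => hL s (by simp [hs])) key
    simpa [List.append_assoc] using this

lemma pvFoldSpec (chunk : List Char) :
    (pvSeps.foldl (fun sp sep =>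
        let pos := PySem.Chars.rfind chunk sep
        if pos > sp then pos + 1 else sp) (-1) = -1 ∧ ∀ i, ¬ pvBrP chunk i)
  ∨ (∃ m : Nat, pvSeps.foldl (fun sp sep =>
        let pos := PySem.Chars.rfind chunk sep
        if pos > sp then pos + 1 else sp) (-1) = (m : Int) + 1 ∧ pvBrP chunk m ∧
        ∀ j, pvBrP chunk j → j ≤ m) := by
  have := pvFoldInv chunk pvSeps [] (-1) (fun s hs => hs) (Or.inl ⟨rfl, by simp⟩)
  simp only [List.nil_append] at this
  rcases this with ⟨h1, h2⟩ | ⟨m, h1, h2, h3⟩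
  · refine Or.inl ⟨h1, ?_⟩
    intro i hi
    obtain ⟨sep, hs, hp⟩ := (pvBrP_iff_sep chunk i).mp hi
    exact absurd hp (by simp [h2 sep hs i])
  · refine Or.inr ⟨m, h1, h2, ?_⟩
    intro j hj
    obtain ⟨sep, hs, hp⟩ := (pvBrP_iff_sep chunk j).mp hj
    exact h3 sep hs j hp
lemma pvScanSpec (p : Nat → Bool) (lo k : Nat) :
    (pvScanBack p lo k = none ∧ ∀ i, lo ≤ i → i < lo + k → p i = false)
  ∨ (∃ m, pvScanBack p lo k = some m ∧ lo ≤ m ∧ m < lo + k ∧ p m = true ∧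
      ∀ i, m < i → i < lo + k → p i = false) := by
  induction k with
  | zero => exact Or.inl ⟨rfl, by omega⟩
  | succ k ih =>
    by_cases h : p (lo + k) = true
    · exact Or.inr ⟨lo + k, by simp [pvScanBack, h], by omega, by omega, h, by omega⟩
    · have h' : p (lo + k) = false := by simpa using h
      rcases ih with ⟨h1, h2⟩ | ⟨m, h1, h2, h3, h4, h5⟩
      · refine Or.inl ⟨by simp [pvScanBack, h', h1], ?_⟩
        intro i hi1 hi2
        rcases Nat.lt_or_ge i (lo + k) with hlt | hge
        · exact h2 i hi1 hlt
        · have : i = lo + k := by omega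
          subst this; exact h'
      · refine Or.inr ⟨m, by simp [pvScanBack, h', h1], h2, by omega, h4, ?_⟩
        intro i hi1 hi2
        rcases Nat.lt_or_ge i (lo + k) with hlt | hge
        · exact h5 i hi1 hlt
        · have : i = lo + k := by omega
          subst this; exact h'

-- indexing bridge: getD equality test vs getElem?
lemma pvGetD_eq_some (t : List Char) (j : Nat) (hj : j < t.length) (c : Char) :
    (t.getD j 'A' == c) = true ↔ t[j]? = some c := by
  rw [List.getD_eq_getElem _ _ hj, List.getElem?_eq_getElem hj]
  simp

lemma pvStepEq (T : List Char) (start lim : Nat) (chunk : List Char)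
    (hchunk : chunk = (T.drop start).take lim) (hlim : 1 ≤ lim)
    (hlen : start + lim < T.length) :
    (if (if (pvSeps.foldl (fun sp sep =>
            let pos := PySem.Chars.rfind chunk sep
            if pos > sp then pos + 1 else sp) (-1)) ≤ 0
         then PySem.Chars.rfind chunk [' ']
         else (pvSeps.foldl (fun sp sep =>
            let pos := PySem.Chars.rfind chunk sep
            if pos > sp then pos + 1 else sp) (-1))) ≤ 0
     then (lim : Int)
     else (if (pvSeps.foldl (fun sp sep =>
            let pos := PySem.Chars.rfind chunk sep
            if pos > sp then pos + 1 else sp) (-1)) ≤ 0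
         then PySem.Chars.rfind chunk [' ']
         else (pvSeps.foldl (fun sp sep =>
            let pos := PySem.Chars.rfind chunk sep
            if pos > sp then pos + 1 else sp) (-1)))) = (pvBreakPos T start lim : Int) ∧
    1 ≤ pvBreakPos T start lim ∧ pvBreakPos T start lim ≤ lim := by
  have hclen : chunk.length = lim := by
    rw [hchunk]; simp; omega
  have hidx : ∀ i, i < lim → ∀ c, (chunk[i]? = some c ↔ (T.getD (start+i) 'A' == c) = true) := by
    intro i hi c
    have h1 : chunk[i]? = T[start+i]? := by
      rw [hchunk, List.getElem?_take_of_lt hi, List.getElem?_drop]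
    rw [h1, pvGetD_eq_some T (start+i) (by omega) c]
  have hbrP : ∀ i, i + 1 < lim → (pvBrP chunk i ↔ pvIsBreakAt T (start+i) = true) := by
    intro i hi
    unfold pvBrP pvIsBreakAt
    simp only [Bool.and_eq_true, Bool.or_eq_true]
    rw [hidx i (by omega) '.', hidx i (by omega) '!', hidx i (by omega) '?',
        hidx (i+1) (by omega) ' ', hidx (i+1) (by omega) '\n',
        show start + (i+1) = start + i + 1 by omega]
    tauto
  have hbrBound : ∀ i, pvBrP chunk i → i + 1 < lim := by
    intro i hi
    rcases hi with ⟨_, h | h⟩ <;>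
      (obtain ⟨hlt, -⟩ := List.getElem?_eq_some_iff.mp h; omega)
  rcases pvFoldSpec chunk with ⟨hf, hnob⟩ | ⟨m, hf, hbr, hmax⟩
  · -- no sentence break in the window
    have hscan1 : pvScanBack (fun i => pvIsBreakAt T i) start (lim - 1) = none := by
      rcases pvScanSpec (fun i => pvIsBreakAt T i) start (lim - 1) with ⟨h1, _⟩ | ⟨k, h1, h2, h3, h4, _⟩
      · exact h1
      · exfalso
        have : pvBrP chunk (k - start) := by
          rw [hbrP (k - start) (by omega), show start + (k - start) = k by omega]
          exact h4
        exact hnob _ this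
    rw [hf, if_pos (by norm_num : (-1 : Int) ≤ 0)]
    rcases pvRfindSpec chunk [' '] (by simp) with ⟨hr, hnos⟩ | ⟨m, hr, hsp, hmaxs⟩
    · -- no space either: hard split
      have hscan2 : pvScanBack (fun j => T.getD j 'A' == ' ') (start + 1) (lim - 1) = none := by
        rcases pvScanSpec (fun j => T.getD j 'A' == ' ') (start+1) (lim - 1) with ⟨h1, _⟩ | ⟨k, h1, h2, h3, h4, _⟩
        · exact h1
        · exfalso
          have hpre : ([' '] : List Char).isPrefixOf (chunk.drop (k - start)) = true := by
            rw [pvPrefix1, hidx (k - start) (by omega) ' ',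
                show start + (k - start) = k by omega]
            exact h4
          rw [hnos (k - start)] at hpre
          exact absurd hpre (by simp)
      have hbp : pvBreakPos T start lim = lim := by
        unfold pvBreakPos; rw [hscan1, hscan2]
      rw [hbp, hr, if_pos (by norm_num : (-1 : Int) ≤ 0)]
      exact ⟨rfl, by omega, by omega⟩
    · have hsp' : chunk[m]? = some ' ' := (pvPrefix1 chunk m ' ').mp hsp
      have hmlt : m < lim := by
        obtain ⟨hlt, -⟩ := List.getElem?_eq_some_iff.mp hsp'
        omega
      have hspT : (T.getD (start+m) 'A' == ' ') = true := by
        rw [← hidx m (by omega) ' ']; exact hsp'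
      by_cases hm0 : m = 0
      · -- last space at relative 0: Python hard-splits anyway
        subst hm0
        have hscan2 : pvScanBack (fun j => T.getD j 'A' == ' ') (start + 1) (lim - 1) = none := by
          rcases pvScanSpec (fun j => T.getD j 'A' == ' ') (start+1) (lim - 1) with ⟨h1, _⟩ | ⟨k, h1, h2, h3, h4, _⟩
          · exact h1
          · exfalso
            have hpre : ([' '] : List Char).isPrefixOf (chunk.drop (k - start)) = true := by
              rw [pvPrefix1, hidx (k - start) (by omega) ' ',
                  show start + (k - start) = k by omega]
              exact h4
            rw [hmaxs (k - start) (by omega)] at hpre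
            exact absurd hpre (by simp)
        have hbp : pvBreakPos T start lim = lim := by
          unfold pvBreakPos; rw [hscan1, hscan2]
        rw [hbp, hr, if_pos (by norm_num : ((0:Nat) : Int) ≤ 0)]
        exact ⟨rfl, by omega, by omega⟩
      · -- last space at relative m ≥ 1: both take it
        have hscan2 : pvScanBack (fun j => T.getD j 'A' == ' ') (start + 1) (lim - 1) = some (start + m) := by
          rcases pvScanSpec (fun j => T.getD j 'A' == ' ') (start+1) (lim - 1) with ⟨h1, h2⟩ | ⟨k, h1, h2, h3, h4, h5⟩
          · exfalso
            have := h2 (start + m) (by omega) (by omega)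
            rw [this] at hspT
            exact absurd hspT (by simp)
          · have hkm : k = start + m := by
              by_contra hne
              rcases Nat.lt_or_ge k (start + m) with hlt | hge
              · have := h5 (start + m) (by omega) (by omega)
                rw [this] at hspT
                exact absurd hspT (by simp)
              · have hpre : ([' '] : List Char).isPrefixOf (chunk.drop (k - start)) = true := by
                  rw [pvPrefix1, hidx (k - start) (by omega) ' ',
                      show start + (k - start) = k by omega]
                  exact h4
                rw [hmaxs (k - start) (by omega)] at hpre
                exact absurd hpre (by simp)
            rw [hkm] at h1
            exact h1
        have hbp : pvBreakPos T start lim = start + m - start := by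
          unfold pvBreakPos; rw [hscan1, hscan2]
        rw [hbp, hr, if_neg (by omega : ¬ ((m : Int) ≤ 0))]
        refine ⟨by omega, by omega, by omega⟩
  · -- sentence break at relative m
    have hm1 : m + 1 < lim := hbrBound m hbr
    have hbrT : pvIsBreakAt T (start + m) = true := (hbrP m hm1).mp hbr
    have hscan1 : pvScanBack (fun i => pvIsBreakAt T i) start (lim - 1) = some (start + m) := by
      rcases pvScanSpec (fun i => pvIsBreakAt T i) start (lim - 1) with ⟨h1, h2⟩ | ⟨k, h1, h2, h3, h4, h5⟩
      · exfalso
        have := h2 (start + m) (by omega) (by omega)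
        rw [this] at hbrT
        exact absurd hbrT (by simp)
      · have hkm : k = start + m := by
          by_contra hne
          rcases Nat.lt_or_ge k (start + m) with hlt | hge
          · have := h5 (start + m) (by omega) (by omega)
            rw [this] at hbrT
            exact absurd hbrT (by simp)
          · have hkbr : pvBrP chunk (k - start) := by
              rw [hbrP (k - start) (by omega), show start + (k - start) = k by omega]
              exact h4
            have := hmax (k - start) hkbr
            omega
        rw [hkm] at h1
        exact h1
    have hbp : pvBreakPos T start lim = start + m + 1 - start := by
      unfold pvBreakPos; rw [hscan1]
    rw [hbp, hf,
        if_neg (by omega : ¬ ((m : Int) + 1 ≤ 0)),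
        if_neg (by omega : ¬ ((m : Int) + 1 ≤ 0))]
    refine ⟨by omega, by omega, by omega⟩
def pvNProps (T : List Char) (n : Nat) : Prop :=
  n ≤ T.length ∧ (∀ j, n ≤ j → j < T.length → PySem.Chars.isspace (T.getD j 'A') = true) ∧
  (0 < n → PySem.Chars.isspace (T.getD (n-1) 'A') = false)

lemma pvRstripEnd_spec (T : List Char) (m : Nat) :
    pvRstripEnd T m ≤ m ∧
    (∀ j, pvRstripEnd T m ≤ j → j < m → PySem.Chars.isspace (T.getD j 'A') = true) ∧
    (0 < pvRstripEnd T m → PySem.Chars.isspace (T.getD (pvRstripEnd T m - 1) 'A') = false) := by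
  induction m with
  | zero => exact ⟨le_refl _, by omega, by intro h; simp [pvRstripEnd] at h⟩
  | succ m ih =>
    obtain ⟨ih1, ih2, ih3⟩ := ih
    by_cases h : PySem.Chars.isspace (T.getD m 'A') = true
    · rw [show pvRstripEnd T (m+1) = pvRstripEnd T m by simp only [pvRstripEnd]; rw [if_pos h]]
      refine ⟨by omega, ?_, ih3⟩
      intro j hj1 hj2
      rcases Nat.lt_or_ge j m with hlt | hge
      · exact ih2 j hj1 hlt
      · have : j = m := by omega
        subst this; exact h
    · rw [show pvRstripEnd T (m+1) = m+1 by simp only [pvRstripEnd]; rw [if_neg h]]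
      exact ⟨le_refl _, by omega, fun _ => by simpa using h⟩

lemma pvNProps_rstripEnd (T : List Char) : pvNProps T (pvRstripEnd T T.length) := by
  obtain ⟨h1, h2, h3⟩ := pvRstripEnd_spec T T.length
  exact ⟨h1, h2, h3⟩

lemma pvSkipWs_ge (T : List Char) (n : Nat) : ∀ p, p ≤ pvSkipWs T n p := by
  have H : ∀ fuel p, n - p ≤ fuel → p ≤ pvSkipWs T n p := by
    intro fuel
    induction fuel with
    | zero =>
      intro p hp
      rw [pvSkipWs]
      split
      · omega
      · exact le_refl _
    | succ fuel ih =>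
      intro p hp
      rw [pvSkipWs]
      split
      · rename_i h
        have := ih (p+1) (by omega)
        omega
      · exact le_refl _
  intro p
  exact H (n - p) p (le_refl _)

lemma pvSkipWs_le (T : List Char) (n : Nat) : ∀ p, p ≤ n → pvSkipWs T n p ≤ n := by
  have H : ∀ fuel p, n - p ≤ fuel → p ≤ n → pvSkipWs T n p ≤ n := by
    intro fuel
    induction fuel with
    | zero =>
      intro p hp hpn
      rw [pvSkipWs]
      split
      · rename_i h; omega
      · exact hpn
    | succ fuel ih =>
      intro p hp hpn
      rw [pvSkipWs]
      split
      · rename_i h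
        exact ih (p+1) (by omega) (by omega)
      · exact hpn
  intro p hpn
  exact H (n - p) p (le_refl _) hpn

lemma pvSkipWs_spec (T : List Char) (n : Nat) : ∀ p,
    (∀ j, p ≤ j → j < pvSkipWs T n p → PySem.Chars.isspace (T.getD j 'A') = true) ∧
    (pvSkipWs T n p < n → PySem.Chars.isspace (T.getD (pvSkipWs T n p) 'A') = false) := by
  have H : ∀ fuel p, n - p ≤ fuel →
      (∀ j, p ≤ j → j < pvSkipWs T n p → PySem.Chars.isspace (T.getD j 'A') = true) ∧
      (pvSkipWs T n p < n → PySem.Chars.isspace (T.getD (pvSkipWs T n p) 'A') = false) := by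
    intro fuel
    induction fuel with
    | zero =>
      intro p hp
      rw [pvSkipWs]
      split
      · rename_i h; omega
      · rename_i h
        refine ⟨by omega, fun hlt => ?_⟩
        by_contra hc
        exact h ⟨hlt, by simpa using hc⟩
    | succ fuel ih =>
      intro p hp
      rw [pvSkipWs]
      split
      · rename_i h
        obtain ⟨ih1, ih2⟩ := ih (p+1) (by omega)
        refine ⟨?_, ih2⟩
        intro j hj1 hj2
        rcases Nat.lt_or_ge j (p+1) with hlt | hge
        · have : j = p := by omega
          subst this; exact h.2
        · exact ih1 j hge hj2
      · rename_i h
        refine ⟨by omega, fun hlt => ?_⟩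
        by_contra hc
        exact h ⟨hlt, by simpa using hc⟩
  intro p
  exact H (n - p) p (le_refl _)

lemma pvSkipWs_congr (T : List Char) (n : Nat) (_hn : n ≤ T.length) : ∀ p,
    pvSkipWs (T.take n) n p = pvSkipWs T n p := by
  have H : ∀ fuel p, n - p ≤ fuel → pvSkipWs (T.take n) n p = pvSkipWs T n p := by
    intro fuel
    induction fuel with
    | zero =>
      intro p hp
      have hnp : ¬ (p < n) := by omega
      conv_lhs => rw [pvSkipWs]
      conv_rhs => rw [pvSkipWs]
      rw [dif_neg (fun hc => hnp hc.1), dif_neg (fun hc => hnp hc.1)]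
    | succ fuel ih =>
      intro p hp
      conv_lhs => rw [pvSkipWs]
      conv_rhs => rw [pvSkipWs]
      by_cases hpn : p < n
      · have hg : (T.take n).getD p 'A' = T.getD p 'A' := by
          rw [List.getD_eq_getElem?_getD, List.getD_eq_getElem?_getD,
              List.getElem?_take_of_lt hpn]
        rw [hg]
        by_cases hw : PySem.Chars.isspace (T.getD p 'A') = true
        · rw [dif_pos ⟨hpn, hw⟩, dif_pos ⟨hpn, hw⟩]
          exact ih (p+1) (by omega)
        · rw [dif_neg (fun hc => hw hc.2), dif_neg (fun hc => hw hc.2)]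
      · rw [dif_neg (fun hc => hpn hc.1), dif_neg (fun hc => hpn hc.1)]
  intro p
  exact H (n - p) p (le_refl _)

-- dropWhile over an interval of whitespace
lemma pvDropWhileDrop (T : List Char) (k u : Nat) (hku : k ≤ u) (hu : u ≤ T.length)
    (hws : ∀ j, k ≤ j → j < u → PySem.Chars.isspace (T.getD j 'A') = true)
    (hstop : u < T.length → PySem.Chars.isspace (T.getD u 'A') = false) :
    List.dropWhile PySem.Chars.isspace (T.drop k) = T.drop u := by
  have H : ∀ d k, k ≤ u → u - k ≤ d →
      (∀ j, k ≤ j → j < u → PySem.Chars.isspace (T.getD j 'A') = true) →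
      List.dropWhile PySem.Chars.isspace (T.drop k) = T.drop u := by
    intro d
    induction d with
    | zero =>
      intro k hku hd hws'
      have : k = u := by omega
      subst this
      rcases Nat.lt_or_ge k T.length with hlt | hge
      · rw [List.drop_eq_getElem_cons hlt, List.dropWhile_cons]
        have := hstop hlt
        rw [List.getD_eq_getElem _ _ hlt] at this
        simp [this]
      · rw [List.drop_eq_nil_of_le hge, List.dropWhile_nil]
    | succ d ih =>
      intro k hku hd hws'
      rcases Nat.lt_or_ge k u with hlt | hge
      · have hkT : k < T.length := by omega
        rw [List.drop_eq_getElem_cons hkT, List.dropWhile_cons]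
        have hw := hws' k (le_refl _) hlt
        rw [List.getD_eq_getElem _ _ hkT] at hw
        rw [hw]
        simp only [if_pos]
        exact ih (k+1) (by omega) (by omega) (fun j h1 h2 => hws' j (by omega) h2)
      · have : k = u := by omega
        subst this
        rcases Nat.lt_or_ge k T.length with hlt2 | hge2
        · rw [List.drop_eq_getElem_cons hlt2, List.dropWhile_cons]
          have := hstop hlt2
          rw [List.getD_eq_getElem _ _ hlt2] at this
          simp [this]
        · rw [List.drop_eq_nil_of_le hge2, List.dropWhile_nil]
  exact H (u - k) k hku (le_refl _) hws

-- rstrip drops an all-whitespace suffix and nothing more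
lemma pvRstripAppend (xs ys : List Char) (hys : ∀ c ∈ ys, PySem.Chars.isspace c = true)
    (hxs : ∀ h : xs ≠ [], PySem.Chars.isspace (xs.getLast h) = false) :
    PySem.Chars.rstrip (xs ++ ys) = xs := by
  unfold PySem.Chars.rstrip
  rw [List.reverse_append, List.dropWhile_append]
  have hys' : List.dropWhile PySem.Chars.isspace ys.reverse = [] := by
    rw [List.dropWhile_eq_nil_iff]
    intro c hc
    exact hys c (by simpa using hc)
  rw [hys']
  simp only [List.isEmpty_nil, if_true]
  rcases List.eq_nil_or_concat xs with rfl | ⟨l, a, rfl⟩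
  · simp
  · have ha : PySem.Chars.isspace a = false := by
      have := hxs (by simp)
      simpa [List.getLast_concat] using this
    rw [show (l.concat a).reverse = a :: l.reverse by simp, List.dropWhile_cons, ha]
    simp

-- strip of a dropped tail, given the right-strip end n
lemma pvAllWsDrop (T : List Char) (n : Nat)
    (hws : ∀ j, n ≤ j → j < T.length → PySem.Chars.isspace (T.getD j 'A') = true)
    (m : Nat) (hm : n ≤ m) : ∀ c ∈ T.drop m, PySem.Chars.isspace c = true := by
  intro c hc
  obtain ⟨i, hi, hEq⟩ := List.getElem_of_mem hc
  rw [List.getElem_drop] at hEq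
  have hlen : m + i < T.length := by
    have := List.length_drop (l := T) (i := m) ▸ hi
    omega
  have := hws (m + i) (by omega) hlen
  rw [List.getD_eq_getElem _ _ hlen] at this
  rw [hEq] at this
  exact this

lemma pvStripDrop (T : List Char) (n : Nat) (hn : pvNProps T n) (k : Nat) :
    PySem.Chars.strip (T.drop k) = (T.take n).drop (pvSkipWs T n k) := by
  obtain ⟨hn1, hn2, hn3⟩ := hn
  unfold PySem.Chars.strip PySem.Chars.lstrip
  rcases Nat.lt_or_ge k n with hkn | hkn
  · -- k < n
    set u := pvSkipWs T n k with hu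
    have hu1 : k ≤ u := pvSkipWs_ge T n k
    have hu2 : u ≤ n := pvSkipWs_le T n k (by omega)
    obtain ⟨hs1, hs2⟩ := pvSkipWs_spec T n k
    rcases Nat.lt_or_ge u n with hun | hun
    · -- stopped at a non-whitespace character
      rw [pvDropWhileDrop T k u hu1 (by omega) hs1 (fun _ => hs2 hun)]
      have hsplit : T.drop u = ((T.take n).drop u) ++ T.drop n := by
        rw [← List.drop_append_of_le_length (by simp; omega), List.take_append_drop]
      rw [hsplit]
      apply pvRstripAppend
      · exact pvAllWsDrop T n hn2 n (le_refl _)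
      · intro hne
        have hlen : ((T.take n).drop u).length = n - u := by simp; omega
        rw [List.getLast_eq_getElem]
        have hidx : (((T.take n).drop u))[((T.take n).drop u).length - 1] =
            T[n-1]'(by omega) := by
          rw [List.getElem_drop, List.getElem_take]
          congr 1
          omega
        rw [hidx]
        have := hn3 (by omega)
        rw [List.getD_eq_getElem _ _ (by omega)] at this
        exact this
    · -- the whole remainder [k, n) is whitespace: everything strips away
      have hun' : u = n := by omega
      have hall : List.dropWhile PySem.Chars.isspace (T.drop k) = [] := by
        rw [List.dropWhile_eq_nil_iff]
        intro c hc
        obtain ⟨i, hi, hEq⟩ := List.getElem_of_mem hc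
        rw [List.getElem_drop] at hEq
        have hlen : k + i < T.length := by
          have := List.length_drop (l := T) (i := k) ▸ hi
          omega
        have hwsj : PySem.Chars.isspace (T.getD (k+i) 'A') = true := by
          rcases Nat.lt_or_ge (k+i) n with h | h
          · exact hs1 (k+i) (by omega) (by omega)
          · exact hn2 (k+i) h hlen
        rw [List.getD_eq_getElem _ _ hlen] at hwsj
        rw [hEq] at hwsj
        exact hwsj
      rw [hall]
      rw [List.drop_eq_nil_of_le (by simp; omega)]
      rfl
  · -- k ≥ n: the tail is pure whitespace
    have h1 : (T.take n).drop (pvSkipWs T n k) = [] := by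
      apply List.drop_eq_nil_of_le
      have := pvSkipWs_ge T n k
      simp
      omega
    rw [h1]
    have h2 : List.dropWhile PySem.Chars.isspace (T.drop k) = [] := by
      rw [List.dropWhile_eq_nil_iff]
      exact pvAllWsDrop T n hn2 k hkn
    rw [h2]
    rfl

lemma pvLoopA_nil (l : Int) (f : Nat) (b : List String) : pvLoopA l f [] b = b := by
  cases f <;> simp [pvLoopA]

lemma pvLoopEq (T : List Char) (lim n : Nat) (hlim : 1 ≤ lim) (hn : pvNProps T n) :
    ∀ fuel start batches (s : List Char),
      (s = (T.take n).drop start ∨ (start = 0 ∧ s = T)) →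
      lim < s.length → s.length < fuel →
      pvLoopA (lim : Int) fuel s batches = pvLoopB T lim n fuel start batches := by
  obtain ⟨hn1, hn2, hn3⟩ := hn
  intro fuel
  induction fuel with
  | zero => intro start batches s _ _ h; omega
  | succ fuel ih =>
    intro start batches s hrep hsz hfuel
    have key : (∀ k, k ≤ lim → s.take k = (T.drop start).take k) ∧
        (∀ m, PySem.Chars.strip (s.drop m) = (T.take n).drop (pvSkipWs T n (start+m))) ∧
        start + lim < T.length ∧ n - start ≤ s.length := by
      rcases hrep with hrep | ⟨hstart0, hsT⟩
      · have hsl : s.length = n - start := by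
          rw [hrep]; simp; omega
        have hnpos : 0 < n := by omega
        refine ⟨?_, ?_, by omega, by omega⟩
        · intro k hk
          rw [hrep, List.drop_take, List.take_take, min_eq_left (by omega)]
        · intro m
          have hdrop : s.drop m = (T.take n).drop (start + m) := by
            rw [hrep, List.drop_drop]
          rw [hdrop]
          have hprops : pvNProps (T.take n) n := by
            refine ⟨by simp; omega, ?_, ?_⟩
            · intro j hj1 hj2
              simp at hj2
              omega
            · intro _
              have hg : (T.take n).getD (n-1) 'A' = T.getD (n-1) 'A' := by
                rw [List.getD_eq_getElem?_getD, List.getD_eq_getElem?_getD,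
                    List.getElem?_take_of_lt (by omega)]
              rw [hg]
              exact hn3 hnpos
          rw [pvStripDrop (T.take n) n hprops (start + m), List.take_take,
              min_self, pvSkipWs_congr T n hn1]
      · subst hstart0
        refine ⟨?_, ?_, by rw [hsT] at hsz; omega, by rw [hsT]; omega⟩
        · intro k _
          rw [hsT]
          simp
        · intro m
          rw [hsT, show (0:Nat) + m = m by omega]
          exact pvStripDrop T n ⟨hn1, hn2, hn3⟩ m
    obtain ⟨h1, h2, h3, h4⟩ := key
    have hsne : s ≠ [] := List.ne_nil_of_length_pos (by omega)
    obtain ⟨hsp2, hbp1, hbp2⟩ := pvStepEq T start lim ((T.drop start).take lim) rfl hlim h3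
    -- unfold one step of A
    simp only [pvLoopA]
    rw [if_neg hsne, if_neg (by omega)]
    have hchunk : PySem.List.slice s none (some ((lim:Nat):Int)) = (T.drop start).take lim := by
      rw [PySem.List.slice_to_natCast]
      exact h1 lim (le_refl _)
    rw [hchunk, hsp2, PySem.List.slice_to_natCast, PySem.List.slice_from_natCast,
        h1 (pvBreakPos T start lim) hbp2, h2 (pvBreakPos T start lim)]
    -- unfold one step of B
    simp only [pvLoopB]
    rw [PySem.List.slice_natCast_add]
    have hge : start + pvBreakPos T start lim ≤ pvSkipWs T n (start + pvBreakPos T start lim) :=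
      pvSkipWs_ge T n _
    by_cases hcase : n ≤ pvSkipWs T n (start + pvBreakPos T start lim)
    · rw [if_pos hcase]
      rw [List.drop_eq_nil_of_le (by simp; omega), pvLoopA_nil]
    · rw [if_neg hcase]
      rw [Nat.not_le] at hcase
      have hlen' : ((T.take n).drop (pvSkipWs T n (start + pvBreakPos T start lim))).length
          = n - pvSkipWs T n (start + pvBreakPos T start lim) := by
        simp; omega
      by_cases hcase2 : n - pvSkipWs T n (start + pvBreakPos T start lim) ≤ lim
      · rw [if_pos hcase2]
        obtain ⟨f', rfl⟩ : ∃ f', fuel = f' + 1 := ⟨fuel - 1, by omega⟩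
        simp only [pvLoopA]
        rw [if_neg (by intro h; rw [h] at hlen'; simp at hlen'; omega),
            if_pos (by rw [hlen']; exact_mod_cast hcase2)]
        rw [PySem.List.slice_natCast, List.drop_take]
      · rw [if_neg hcase2]
        apply ih
        · exact Or.inl rfl
        · rw [hlen']; omega
        · rw [hlen']; omega

-- ===== VERDICT (by name: the statement is the Claim_ definition above) =====
theorem split_text_into_batches_spec : Claim_equal_split_text_into_batches := by
  intro text limit hdom hpre
  unfold Spec_split_text_into_batches
  unfold split_text_into_batches split_text_into_batches_alt
  by_cases hnil : text.toList = []
  · rw [hnil]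
    simp [pvLoopA]
  · rw [if_neg hnil]
    by_cases hfit : ((text.toList.length : Int) ≤ limit)
    · rw [if_pos hfit]
      simp only [pvLoopA]
      rw [if_neg hnil, if_pos hfit]
      simp
    · rw [if_neg hfit]
      have hlim1 : 1 ≤ limit := by
        rcases hpre with h | h
        · exact h
        · exfalso
          apply hnil
          rw [h]
          rfl
      have hlim : 1 ≤ limit.toNat := by omega
      have hcast : ((limit.toNat : Nat) : Int) = limit := Int.toNat_of_nonneg (by omega)
      rw [← hcast]
      apply pvLoopEq text.toList limit.toNat (pvRstripEnd text.toList text.toList.length)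
        hlim (pvNProps_rstripEnd text.toList) (text.toList.length + 1) 0 []
        text.toList (Or.inr ⟨rfl, rfl⟩) (by omega) (by omega)
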